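-- pv_equiv track=rewrite | github.com/ilseobs/CodingTest | 7.빈도수.py | solution
-- ===== SOURCE A (Python) =====
-- from collections import defaultdict, Counter
--
-- def solution(nums):
--     answer = -1
--     temp = defaultdict(int)
--
--     for i in nums:
--         temp[i] += 1
--
--     for k in temp:
--         if temp[k] == 1:
--             answer = max(answer , k)
--
--     return answer
-- ===== SOURCE B (Python) =====
-- def solution(nums):
--     answer = -1
--     s = sorted(nums)
--     n = len(s)
--     i = 0
--     while i < n:
--         j = i + 1
--         while j < n and s[j] == s[i]:
--             j += 1
--         if j - i == 1:
--             answer = max(answer, s[i])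
--         i = j
--     return answer
-- ===== Notes on version B (the rewrite author's own statement) =====
-- stated objective: alternative
-- what changed: Replaces the hash-counter plus key scan with sort-then-run-length scan: sort nums ascending, walk it once counting each run of equal adjacent values, and fold every length-1 run into the answer via max.
import Mathlib
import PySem

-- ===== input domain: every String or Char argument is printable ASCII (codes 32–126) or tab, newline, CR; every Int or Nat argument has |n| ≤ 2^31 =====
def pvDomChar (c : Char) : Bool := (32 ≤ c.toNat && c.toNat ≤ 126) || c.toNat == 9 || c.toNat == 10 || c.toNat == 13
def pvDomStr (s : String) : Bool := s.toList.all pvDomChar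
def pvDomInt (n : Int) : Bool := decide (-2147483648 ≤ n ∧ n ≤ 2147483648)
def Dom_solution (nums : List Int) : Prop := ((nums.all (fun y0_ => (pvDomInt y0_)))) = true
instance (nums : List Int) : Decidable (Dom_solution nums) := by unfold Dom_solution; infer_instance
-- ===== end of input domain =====

-- B replaces A's counter dict + key scan by sort-then-run-length scan (alternative decomposition, same value).

-- ===== PORT A =====
-- temp = defaultdict(int); for i in nums: temp[i] += 1; for k in temp: if temp[k] == 1: answer = max(answer, k)
def solution (nums : List Int) : Int :=
  let temp : PySem.Dict Int Int := nums.foldl (fun d i => d.modify i 0 (· + 1)) PySem.Dict.empty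
  temp.keys.foldl (fun answer k => if temp.getD k 0 = 1 then max answer k else answer) (-1)

-- ===== PORT B =====
-- outer while: peel the run of the head value off the sorted list (inner while = takeWhile/dropWhile of equal neighbours)
def solRuns (answer : Int) : List Int → Int
  | [] => answer
  | v :: rest =>
      let answer' := if rest.takeWhile (· == v) = [] then max answer v else answer
      solRuns answer' (rest.dropWhile (· == v))
termination_by l => l.length
decreasing_by
  simp only [List.length_cons]
  exact Nat.lt_succ_of_le (List.length_dropWhile_le _ _)

def solution_alt (nums : List Int) : Int :=
  solRuns (-1) (PySem.List.sorted nums (fun x => x) false)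

-- ===== PRECONDITION & SPEC =====
def Spec_solution (nums : List Int) (out : Int) : Prop := out = solution_alt nums
instance (nums : List Int) (out : Int) : Decidable (Spec_solution nums out) := by unfold Spec_solution; infer_instance

-- ===== CLAIM (what is proved, stated in full; the proofs are below) =====
def Claim_equal_solution : Prop := ∀ (nums : List Int), Dom_solution nums → Spec_solution nums (solution nums)

-- ===== LEMMAS AND PROOFS =====

-- the values forming runs of length exactly 1 (same recursion shape as solRuns)
def sings : List Int → List Int
  | [] => []
  | v :: rest =>
      (if rest.takeWhile (· == v) = [] then [v] else []) ++ sings (rest.dropWhile (· == v))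
termination_by l => l.length
decreasing_by
  simp only [List.length_cons]
  exact Nat.lt_succ_of_le (List.length_dropWhile_le _ _)

theorem solRuns_eq_foldl_max (l : List Int) : ∀ a : Int, solRuns a l = (sings l).foldl max a := by
  induction l using sings.induct with
  | case1 => intro a; simp [solRuns, sings]
  | case2 v rest ih =>
      intro a
      rw [solRuns, sings]
      by_cases h : rest.takeWhile (· == v) = [] <;> simp [h, ih]

theorem foldl_if_max_eq_filter (p : Int → Prop) [DecidablePred p] (l : List Int) :
    ∀ a : Int, l.foldl (fun ans k => if p k then max ans k else ans) a
      = (l.filter (fun k => decide (p k))).foldl max a := by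
  induction l with
  | nil => intro a; rfl
  | cons x t ih =>
      intro a
      simp only [List.foldl_cons, List.filter_cons]
      by_cases h : p x <;> simp [h, ih]

theorem foldl_max_le (l : List Int) (a b : Int) (ha : a ≤ b) (h : ∀ x ∈ l, x ≤ b) :
    l.foldl max a ≤ b := by
  induction l generalizing a with
  | nil => exact ha
  | cons x t ih =>
      exact ih (max a x) (max_le ha (h x (by simp))) (fun y hy => h y (by simp [hy]))

theorem foldl_max_congr (l₁ l₂ : List Int) (a : Int) (h : ∀ x, x ∈ l₁ ↔ x ∈ l₂) :
    l₁.foldl max a = l₂.foldl max a := by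
  apply le_antisymm
  · exact foldl_max_le _ _ _ (PySem.List.le_foldl_max l₂ a).1
      (fun x hx => (PySem.List.le_foldl_max l₂ a).2 x ((h x).1 hx))
  · exact foldl_max_le _ _ _ (PySem.List.le_foldl_max l₁ a).1
      (fun x hx => (PySem.List.le_foldl_max l₁ a).2 x ((h x).2 hx))

theorem sings_subset (l : List Int) : ∀ x ∈ sings l, x ∈ l := by
  induction l using sings.induct with
  | case1 => simp [sings]
  | case2 v rest ih =>
      intro x hx
      rw [sings] at hx
      rcases List.mem_append.1 hx with h | h
      · split_ifs at h with h' <;> simp_all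
      · exact List.mem_cons_of_mem _ ((List.dropWhile_sublist (· == v)).subset (ih x h))

theorem not_mem_dropWhile_beq (v : Int) : ∀ (r : List Int), (∀ y ∈ r, v ≤ y) →
    r.Pairwise (· ≤ ·) → v ∉ r.dropWhile (· == v) := by
  intro r
  induction r with
  | nil => simp
  | cons w t ih =>
      intro hle hp
      by_cases hw : (w == v) = true
      · simp only [List.dropWhile_cons, hw, if_true]
        exact ih (fun y hy => hle y (List.mem_cons_of_mem _ hy)) hp.of_cons
      · simp only [List.dropWhile_cons, hw]
        intro hmem
        have hwv : w ≠ v := by simpa using hw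
        rcases List.mem_cons.1 hmem with h | h
        · exact hwv h.symm
        · have h1 : w ≤ v := (List.pairwise_cons.1 hp).1 v h
          have h2 : v ≤ w := hle w (List.mem_cons_self)
          exact hwv (le_antisymm h1 h2)

theorem mem_sings_iff_count (l : List Int) : l.Pairwise (· ≤ ·) →
    ∀ x : Int, (x ∈ sings l ↔ l.count x = 1) := by
  induction l using sings.induct with
  | case1 => simp [sings]
  | case2 v rest ih =>
      intro hs x
      have hrw : rest.takeWhile (· == v) ++ rest.dropWhile (· == v) = rest :=
        List.takeWhile_append_dropWhile
      have hd : (rest.dropWhile (· == v)).Pairwise (· ≤ ·) :=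
        List.Pairwise.sublist (List.dropWhile_sublist _) hs.of_cons
      have htake : ∀ y ∈ rest.takeWhile (· == v), y = v := by
        intro y hy
        have := List.mem_takeWhile_imp hy
        simpa using this
      have hvnotd : v ∉ rest.dropWhile (· == v) :=
        not_mem_dropWhile_beq v rest (fun y hy => (List.pairwise_cons.1 hs).1 y hy) hs.of_cons
      have hctake : (rest.takeWhile (· == v)).count v = (rest.takeWhile (· == v)).length :=
        List.count_eq_length.2 (fun y hy => by simp [htake y hy])
      have hcdrop : (rest.dropWhile (· == v)).count v = 0 := List.count_eq_zero.2 hvnotd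
      rw [sings]
      by_cases hx : x = v
      · subst hx
        have hnot : x ∉ sings (rest.dropWhile (· == x)) :=
          fun h => hvnotd (sings_subset _ x h)
        have h3 : rest.count x = (rest.takeWhile (· == x)).length := by
          conv_lhs => rw [← hrw]
          rw [List.count_append, hctake, hcdrop]
          omega
        have hcnt : (x :: rest).count x = 1 + (rest.takeWhile (· == x)).length := by
          rw [List.count_cons_self, h3]; omega
        constructor
        · intro hmem
          rcases List.mem_append.1 hmem with h | h
          · split_ifs at h with h'
            · simp [hcnt, h']
            · simp at h
          · exact absurd h hnot
        · intro hc
          have hlen : (rest.takeWhile (· == x)).length = 0 := by omega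
          simp [List.length_eq_zero_iff.1 hlen]
      · have hctx : (rest.takeWhile (· == v)).count x = 0 :=
          List.count_eq_zero.2 (fun h => hx (htake x h))
        have h2 : (v :: rest).count x = rest.count x := by
          simp [List.count_cons]; omega
        have h3 : rest.count x = (rest.dropWhile (· == v)).count x := by
          conv_lhs => rw [← hrw]
          rw [List.count_append, hctx]
          omega
        have hcnt : (v :: rest).count x = (rest.dropWhile (· == v)).count x := by
          rw [h2, h3]
        have hxind := ih hd x
        constructor
        · intro hmem
          rcases List.mem_append.1 hmem with h | h
          · split_ifs at h with h'
            · exact absurd (by simpa using h) hx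
            · simp at h
          · rw [hcnt]; exact hxind.1 h
        · intro hc
          exact List.mem_append.2 (Or.inr (hxind.2 (by rw [← hcnt]; exact hc)))

theorem solution_eq (nums : List Int) : solution nums = solution_alt nums := by
  unfold solution solution_alt
  rw [← PySem.Dict.counter_eq_foldl]
  simp only [PySem.Dict.keys_counter, PySem.Dict.getD_counter]
  rw [solRuns_eq_foldl_max,
      foldl_if_max_eq_filter (fun k => ((nums.count k : Int)) = 1)]
  apply foldl_max_congr
  intro x
  have hsortpw : (PySem.List.sorted nums (fun x => x) false).Pairwise (· ≤ ·) :=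
    PySem.List.sorted_pairwise nums (fun x => x)
  have hperm : (PySem.List.sorted nums (fun x => x) false).Perm nums :=
    PySem.List.sorted_perm nums (fun x => x) false
  rw [List.mem_filter, PySem.Set.mem_ofList,
      mem_sings_iff_count _ hsortpw x, hperm.count_eq]
  constructor
  · rintro ⟨-, h⟩
    have : nums.count x = 1 := by exact_mod_cast of_decide_eq_true h
    exact this
  · intro h
    refine ⟨List.count_pos_iff.1 (by omega), decide_eq_true ?_⟩
    exact_mod_cast h

-- ===== VERDICT (by name: the statement is the Claim_ definition above) =====
theorem solution_spec : Claim_equal_solution := by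
  intro nums _
  exact solution_eq nums
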